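-- pv_equiv track=rewrite | github.com/macnietzsche/change-calculation | src/services/change_calculation.py | process_change
-- ===== SOURCE A (Python) =====
-- from typing import List
-- from itertools import product
--
-- def dot_product(vector_a: List[float], vector_b: List[float])->float:
--    if len(vector_a) != len(vector_b):
--       return 0
--    return sum(i[0] * i[1] for i in zip(vector_a, vector_b))
--
-- def process_change(required_value: int, current_cash: dict):
--     numbers_of_bills = list(current_cash.values())
--     bill_denominations = list(current_cash.keys())
--     iterated_numbers_of_bills = list(map(lambda x: list(range(x + 1)), numbers_of_bills))
--
--     posibilities = product(*iterated_numbers_of_bills)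
--     posibilities_as_dict = list(map(lambda item: dict(zip(bill_denominations, item)),posibilities))
--     for posibility in posibilities_as_dict:
--         values = list(posibility.values())
--         keys = list(posibility.keys())
--
--         amount = dot_product(values,keys)
--         if amount == required_value:
--             response = current_cash.copy()
--             for key in keys:
--                 response[key] -= posibility[key]
--             return response
--     return None
-- ===== SOURCE B (Python) =====
-- def process_change(required_value: int, current_cash: dict):
--     items = list(current_cash.items())
--
--     def search(i, remaining):
--         # returns the lexicographically smallest list of counts for items[i:]
--         # summing to `remaining`, or None
--         if i == len(items):
--             return [] if remaining == 0 else None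
--         denom, count = items[i]
--         for c in range(count + 1):
--             rest = search(i + 1, remaining - c * denom)
--             if rest is not None:
--                 return [c] + rest
--         return None
--
--     counts = search(0, required_value)
--     if counts is None:
--         return None
--     return {d: n - c for (d, n), c in zip(items, counts)}
-- ===== Notes on version B (the rewrite author's own statement) =====
-- stated objective: alternative
-- what changed: Replaces the materialized cartesian product of all count tuples (each converted to a dict and re-scored with a dot product from scratch) by a recursive early-exit depth-first search that threads the remaining amount and returns the first (lexicographically smallest) count vector; allocates nothing per candidate but has the same exponential worst case.
import Mathlib
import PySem

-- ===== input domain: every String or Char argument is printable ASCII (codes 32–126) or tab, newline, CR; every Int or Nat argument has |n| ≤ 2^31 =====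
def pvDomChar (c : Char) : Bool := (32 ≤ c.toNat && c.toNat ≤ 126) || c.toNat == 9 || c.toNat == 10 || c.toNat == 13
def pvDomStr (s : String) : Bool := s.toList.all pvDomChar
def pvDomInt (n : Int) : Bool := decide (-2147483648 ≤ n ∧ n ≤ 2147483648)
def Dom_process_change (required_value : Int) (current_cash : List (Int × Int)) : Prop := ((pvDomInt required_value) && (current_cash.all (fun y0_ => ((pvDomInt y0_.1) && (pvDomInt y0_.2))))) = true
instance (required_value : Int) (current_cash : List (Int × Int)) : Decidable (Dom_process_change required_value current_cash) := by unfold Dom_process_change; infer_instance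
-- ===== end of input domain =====

-- B replaces A's materialized cartesian product of count tuples by a recursive early-exit
-- depth-first search threading the remaining amount (an alternative algorithm, same worst case).

-- ===== PORT A =====
-- helper dot_product from the module (on ints here, per the dict's value type)
def pcDot (vector_a : List Int) (vector_b : List Int) : Int :=
  if vector_a.length ≠ vector_b.length then 0
  else ((vector_a.zip vector_b).map (fun i => i.1 * i.2)).sum

-- itertools.product(*lists), transliterated (first factor varies slowest)
def pcProduct : List (List Int) → List (List Int)
  | [] => [[]]
  | l :: ls => l.flatMap (fun x => (pcProduct ls).map (fun t => x :: t))

-- the 'for posibility in posibilities_as_dict' loop; response[key] -= posibility[key]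
-- is Dict.modify (every key is present, so the default 0 is never used)
def pcLoop (required_value : Int) (cash : PySem.Dict Int Int) :
    List (PySem.Dict Int Int) → Option (List (Int × Int))
  | [] => none
  | p :: rest =>
    let values := PySem.Dict.values p
    let keys := PySem.Dict.keys p
    let amount := pcDot values keys
    if amount = required_value then
      some ((keys.foldl (fun r k => r.modify k 0 (fun v => v - p.getD k 0)) cash).items)
    else pcLoop required_value cash rest

def process_change (required_value : Int) (current_cash : List (Int × Int)) : Option (List (Int × Int)) :=
  let d : PySem.Dict Int Int := PySem.Dict.mk current_cash
  let numbers_of_bills := PySem.Dict.values d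
  let bill_denominations := PySem.Dict.keys d
  let iterated_numbers_of_bills := numbers_of_bills.map (fun x => PySem.List.pyRange 0 (x + 1) 1)
  let posibilities := pcProduct iterated_numbers_of_bills
  let posibilities_as_dict := posibilities.map (fun item => PySem.Dict.ofList (bill_denominations.zip item))
  pcLoop required_value d posibilities_as_dict

-- ===== PORT B =====
-- search(i, remaining): lexicographically smallest count list for the remaining items, or None
def pcSearch : List (Int × Int) → Int → Option (List Int)
  | [], remaining => if remaining = 0 then some [] else none
  | (denom, count) :: rest, remaining =>
    (PySem.List.pyRange 0 (count + 1) 1).findSome? (fun c =>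
      (pcSearch rest (remaining - c * denom)).map (fun t => c :: t))

def process_change_alt (required_value : Int) (current_cash : List (Int × Int)) : Option (List (Int × Int)) :=
  match pcSearch current_cash required_value with
  | none => none
  | some counts => some ((current_cash.zip counts).map (fun p => (p.1.1, p.1.2 - p.2)))

-- ===== PRECONDITION & SPEC =====
-- A's parameter is a Python dict, whose keys are necessarily distinct; Pre_ restricts the
-- association-list representation to that natural domain (lists with duplicate keys represent no dict).
def Pre_process_change (required_value : Int) (current_cash : List (Int × Int)) : Prop :=
  (current_cash.map Prod.fst).Nodup
instance (required_value : Int) (current_cash : List (Int × Int)) : Decidable (Pre_process_change required_value current_cash) := by unfold Pre_process_change; infer_instance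

def pvWitness_process_change : Int × (List (Int × Int)) := (7, [(5, 2), (2, 3)])

def Spec_process_change (required_value : Int) (current_cash : List (Int × Int)) (out : Option (List (Int × Int))) : Prop := out = process_change_alt required_value current_cash
instance (required_value : Int) (current_cash : List (Int × Int)) (out : Option (List (Int × Int))) : Decidable (Spec_process_change required_value current_cash out) := by unfold Spec_process_change; infer_instance

-- ===== CLAIM (what is proved, stated in full; the proofs are below) =====
def Claim_equal_process_change : Prop := ∀ (required_value : Int) (current_cash : List (Int × Int)), Dom_process_change required_value current_cash → Pre_process_change required_value current_cash → Spec_process_change required_value current_cash (process_change required_value current_cash)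

-- ===== LEMMAS AND PROOFS =====

-- every tuple produced by itertools.product has one entry per factor
lemma length_of_mem_pcProduct {ls : List (List Int)} {t : List Int}
    (h : t ∈ pcProduct ls) : t.length = ls.length := by
  induction ls generalizing t with
  | nil => simp [pcProduct] at h; simp [h]
  | cons l ls ih =>
    simp only [pcProduct, List.mem_flatMap, List.mem_map] at h
    obtain ⟨x, -, t', ht', rfl⟩ := h
    simp [ih ht']

-- find? over a flatMap is findSome? of the inner find?s
lemma find?_flatMap {α β : Type} (l : List α) (f : α → List β) (p : β → Bool) :
    (l.flatMap f).find? p = l.findSome? (fun a => (f a).find? p) := by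
  induction l with
  | nil => simp
  | cons a l ih =>
    simp only [List.flatMap_cons, List.find?_append, List.findSome?_cons, ih]
    cases (f a).find? p <;> simp

-- find? with pointwise-equal predicates on the members
lemma find?_congr_mem {α : Type} {l : List α} {p q : α → Bool}
    (h : ∀ x ∈ l, p x = q x) : l.find? p = l.find? q := by
  induction l with
  | nil => rfl
  | cons a l ih =>
    simp only [List.find?_cons, h a (by simp)]
    cases hq : q a with
    | true => rfl
    | false => exact ih (fun x hx => h x (by simp [hx]))

-- the loop of A is a find? followed by the response construction
lemma pcLoop_eq_find (r : Int) (d : PySem.Dict Int Int) (ps : List (PySem.Dict Int Int)) :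
    pcLoop r d ps =
      (ps.find? (fun p => decide (pcDot (PySem.Dict.values p) (PySem.Dict.keys p) = r))).map
        (fun p => ((PySem.Dict.keys p).foldl (fun s k => s.modify k 0 (fun v => v - p.getD k 0)) d).items) := by
  induction ps with
  | nil => rfl
  | cons p rest ih =>
    simp only [pcLoop, List.find?_cons]
    by_cases h : pcDot (PySem.Dict.values p) (PySem.Dict.keys p) = r
    · simp [h]
    · simp [h, ih]

-- dict(zip(ks, vs)) with distinct keys is just the zip list
lemma items_ofList_zip (ks : List Int) (vs : List Int)
    (hnd : ks.Nodup) (hlen : vs.length = ks.length) :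
    (PySem.Dict.ofList (ks.zip vs)).items = ks.zip vs := by
  have hle : ks.length ≤ vs.length := le_of_eq hlen.symm
  have h1 : (ks.zip vs).map Prod.fst = ks := List.map_fst_zip hle
  have h := PySem.Dict.items_foldl_insert_fresh (ks.zip vs) Prod.fst Prod.snd
      (PySem.Dict.empty : PySem.Dict Int Int)
      (fun a _ => PySem.Dict.contains_empty a.1) (by rw [h1]; exact hnd)
  simpa [PySem.Dict.ofList, PySem.Dict.update] using h

-- the possibility dict's keys, values, lookups
lemma keys_ofList_zip (ks : List Int) (vs : List Int)
    (hnd : ks.Nodup) (hlen : vs.length = ks.length) :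
    (PySem.Dict.ofList (ks.zip vs)).keys = ks := by
  simp only [PySem.Dict.keys, items_ofList_zip ks vs hnd hlen]
  exact List.map_fst_zip (le_of_eq hlen.symm)

lemma values_ofList_zip (ks : List Int) (vs : List Int)
    (hnd : ks.Nodup) (hlen : vs.length = ks.length) :
    (PySem.Dict.ofList (ks.zip vs)).values = vs := by
  simp only [PySem.Dict.values, items_ofList_zip ks vs hnd hlen]
  exact List.map_snd_zip (le_of_eq hlen)

-- pcDot on equal-length lists, cons form
lemma pcDot_cons (a b : Int) (va vb : List Int) (h : va.length = vb.length) :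
    pcDot (a :: va) (b :: vb) = a * b + pcDot va vb := by
  simp [pcDot, h]

-- the core: first matching tuple of the cartesian product = the DFS of B
lemma find_product_eq_search (cs : List (Int × Int)) (r : Int) :
    ((pcProduct (cs.map (fun q => PySem.List.pyRange 0 (q.2 + 1) 1))).find?
        (fun item => decide (pcDot item (cs.map Prod.fst) = r))) = pcSearch cs r := by
  induction cs generalizing r with
  | nil =>
    by_cases hr : r = 0
    · simp [pcProduct, pcSearch, pcDot, hr]
    · simp [pcProduct, pcSearch, pcDot, hr, eq_comm]
  | cons q cs ih =>
    obtain ⟨dn, cnt⟩ := q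
    simp only [List.map_cons, pcProduct, pcSearch]
    rw [find?_flatMap]
    have hstep : ∀ c : Int,
        List.find? (fun item => decide (pcDot item (dn :: cs.map Prod.fst) = r))
            ((pcProduct (cs.map (fun q => PySem.List.pyRange 0 (q.2 + 1) 1))).map (fun t => c :: t)) =
          Option.map (fun t => c :: t) (pcSearch cs (r - c * dn)) := by
      intro c
      rw [List.find?_map,
        find?_congr_mem (q := fun t => decide (pcDot t (cs.map Prod.fst) = r - c * dn))
          (fun t ht => by
            have hlen : t.length = (cs.map Prod.fst).length := by
              simpa using length_of_mem_pcProduct ht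
            simp only [Function.comp_apply, pcDot_cons c dn t (cs.map Prod.fst) hlen,
              decide_eq_decide]
            omega),
        ih]
    refine congrFun (congrArg List.findSome? (funext fun c => ?_)) _
    exact hstep c

-- folding modify over distinct present keys: pointwise effect
lemma getD_foldl_modify_distinct (ks : List Int) (g : Int → Int → Int)
    (d : PySem.Dict Int Int) (k : Int) (hnd : ks.Nodup) :
    ((ks.foldl (fun s j => s.modify j 0 (fun v => g j v)) d).getD k 0) =
      if k ∈ ks then g k (d.getD k 0) else d.getD k 0 := by
  induction ks generalizing d with
  | nil => simp
  | cons j ks ih =>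
    have hj : j ∉ ks := (List.nodup_cons.mp hnd).1
    have hnd' : ks.Nodup := (List.nodup_cons.mp hnd).2
    simp only [List.foldl_cons]
    rw [ih _ hnd']
    by_cases hk : k ∈ ks
    · have hne : k ≠ j := fun e => hj (e ▸ hk)
      simp [hk, PySem.Dict.getD_modify, hne]

    · by_cases hkj : k = j
      · subst hkj; simp [hk]
      · simp [hk, hkj, PySem.Dict.getD_modify]

lemma keys_foldl_modify_mem (ks : List Int) (g : Int → Int → Int) (d : PySem.Dict Int Int)
    (h : ∀ k ∈ ks, k ∈ d.keys) :
    (ks.foldl (fun s j => s.modify j 0 (fun v => g j v)) d).keys = d.keys := by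
  induction ks generalizing d with
  | nil => simp
  | cons j ks ih =>
    have hjmem : j ∈ d.keys := h j (by simp)
    have hkeys : (d.modify j 0 (fun v => g j v)).keys = d.keys := by
      rw [PySem.Dict.keys_modify, PySem.Dict.keys_insert_of_contains]
      exact (PySem.Dict.contains_iff_mem_keys d j).mpr hjmem
    simp only [List.foldl_cons]
    rw [ih _ (fun k hk => by rw [hkeys]; exact h k (by simp [hk])), hkeys]

-- the response built by A equals B's zip-subtraction
lemma response_eq (cash : List (Int × Int)) (counts : List Int)
    (hnd : (cash.map Prod.fst).Nodup) (hlen : counts.length = cash.length) :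
    (((cash.map Prod.fst).foldl
        (fun s k => s.modify k 0 (fun v => v - (PySem.Dict.ofList ((cash.map Prod.fst).zip counts)).getD k 0))
        (PySem.Dict.mk cash)).items) =
      (cash.zip counts).map (fun p => (p.1.1, p.1.2 - p.2)) := by
  have hlen' : counts.length = (cash.map Prod.fst).length := by simpa using hlen
  have hkeysd : (PySem.Dict.mk cash).keys = cash.map Prod.fst := rfl
  have hPitems : (PySem.Dict.ofList ((cash.map Prod.fst).zip counts)).items =
      (cash.map Prod.fst).zip counts := items_ofList_zip _ _ hnd hlen'
  have hPkeys : (PySem.Dict.ofList ((cash.map Prod.fst).zip counts)).keys =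
      cash.map Prod.fst := keys_ofList_zip _ _ hnd hlen'
  have hkeys := keys_foldl_modify_mem (cash.map Prod.fst)
      (fun k v => v - (PySem.Dict.ofList ((cash.map Prod.fst).zip counts)).getD k 0)
      (PySem.Dict.mk cash) (fun k hk => by rw [hkeysd]; exact hk)
  have hndk : ((cash.map Prod.fst).foldl
      (fun s k => s.modify k 0 (fun v => v - (PySem.Dict.ofList ((cash.map Prod.fst).zip counts)).getD k 0))
      (PySem.Dict.mk cash)).keys.Nodup := by rw [hkeys, hkeysd]; exact hnd
  rw [PySem.Dict.items_eq_map_keys _ hndk 0, hkeys, hkeysd]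
  apply List.ext_getElem
  · simp [hlen]
  · intro i h1 h2
    have hic : i < cash.length := by simpa using h1
    have hict : i < counts.length := by omega
    have hd : (PySem.Dict.mk cash).getD (cash[i].1) 0 = cash[i].2 := by
      refine PySem.Dict.getD_of_mem_items _ ?_ hnd 0
      have h := List.getElem_mem hic
      simpa using h
    have hP : (PySem.Dict.ofList ((cash.map Prod.fst).zip counts)).getD (cash[i].1) 0 = counts[i] := by
      refine PySem.Dict.getD_of_mem_items _ ?_ (by rw [hPkeys]; exact hnd) 0
      rw [hPitems]
      have hizip : i < ((cash.map Prod.fst).zip counts).length := by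
        simp only [List.length_zip, List.length_map]; omega
      have hm := List.getElem_mem hizip
      simpa [List.getElem_zip] using hm
    have hfold := getD_foldl_modify_distinct (cash.map Prod.fst)
      (fun k v => v - (PySem.Dict.ofList ((cash.map Prod.fst).zip counts)).getD k 0)
      (PySem.Dict.mk cash) (cash[i].1) hnd
    have hmemk : cash[i].1 ∈ cash.map Prod.fst := by
      exact List.mem_map_of_mem (List.getElem_mem hic)
    simp only [List.getElem_map, List.getElem_zip, hfold, hmemk, if_true, hd, hP]

-- ===== VERDICT (by name: the statement is the Claim_ definition above) =====
lemma toDict_arg (cash : List (Int × Int)) :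
    (cash.map Prod.snd).map (fun x => PySem.List.pyRange 0 (x + 1) 1) =
      cash.map (fun q => PySem.List.pyRange 0 (q.2 + 1) 1) := by
  rw [List.map_map]; rfl

theorem process_change_spec : Claim_equal_process_change := by
  intro r cash _ hnd
  show process_change r cash = process_change_alt r cash
  simp only [process_change]
  rw [pcLoop_eq_find, List.find?_map, Option.map_map]
  have hkeys : (PySem.Dict.mk cash).keys = cash.map Prod.fst := rfl
  have hvals : (PySem.Dict.mk cash).values = cash.map Prod.snd := rfl
  rw [hkeys, hvals, toDict_arg]
  have hchar : ∀ t ∈ pcProduct (cash.map (fun q => PySem.List.pyRange 0 (q.2 + 1) 1)),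
      t.length = (cash.map Prod.fst).length ∧
      (PySem.Dict.ofList ((cash.map Prod.fst).zip t)).keys = cash.map Prod.fst ∧
      (PySem.Dict.ofList ((cash.map Prod.fst).zip t)).values = t := by
    intro t ht
    have hlen : t.length = (cash.map Prod.fst).length := by
      simpa using length_of_mem_pcProduct ht
    exact ⟨hlen, keys_ofList_zip _ _ hnd hlen, values_ofList_zip _ _ hnd hlen⟩
  rw [find?_congr_mem (q := fun t => decide (pcDot t (cash.map Prod.fst) = r))
    (fun t ht => by
      obtain ⟨hlen, hk, hv⟩ := hchar t ht
      simp only [Function.comp_apply, hk, hv])]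
  have hfind := find_product_eq_search cash r
  rw [hfind]
  cases hS : pcSearch cash r with
  | none => simp [process_change_alt, hS]
  | some counts =>
    have hmem : counts ∈ pcProduct (cash.map (fun q => PySem.List.pyRange 0 (q.2 + 1) 1)) :=
      List.mem_of_find?_eq_some (hfind ▸ hS)
    obtain ⟨hlen, hk, hv⟩ := hchar counts hmem
    have hlenc : counts.length = cash.length := by simpa using hlen
    simp only [process_change_alt, hS, Option.map_some, Function.comp_apply]
    rw [hk]
    exact congrArg some (response_eq cash counts hnd hlenc)
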